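-- pv_equiv track=rewrite | github.com/ZKPunk-Org/reduction | fix_latex_macros.py | fix_game_macro
-- ===== SOURCE A (Python) =====
-- def find_matching_brace(s, start):
--     """Find the matching closing brace for an opening brace at position start."""
--     count = 1
--     i = start + 1
--     while i < len(s) and count > 0:
--         if s[i] == '{' and (i == 0 or s[i-1] != '\\'):
--             count += 1
--         elif s[i] == '}' and (i == 0 or s[i-1] != '\\'):
--             count -= 1
--         i += 1
--     return i - 1 if count == 0 else -1
--
-- def fix_game_macro(text):
--     """Replace \game{arg1}{arg2} with arg1_{arg2}."""
--     result = []
--     i = 0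
--     while i < len(text):
--         # Look for \game{
--         if text[i:i+6] == r'\game{':
--             # Find first argument
--             start1 = i + 5
--             end1 = find_matching_brace(text, start1)
--             if end1 == -1:
--                 result.append(text[i])
--                 i += 1
--                 continue
--
--             arg1 = text[start1+1:end1]
--
--             # Find second argument
--             if end1 + 1 < len(text) and text[end1+1] == '{':
--                 start2 = end1 + 1
--                 end2 = find_matching_brace(text, start2)
--                 if end2 == -1:
--                     result.append(text[i])
--                     i += 1
--                     continue
--
--                 arg2 = text[start2+1:end2]
--
--                 # Replace with arg1_{arg2}
--                 result.append(f'{arg1}_{{{arg2}}}')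
--                 i = end2 + 1
--             else:
--                 result.append(text[i])
--                 i += 1
--         else:
--             result.append(text[i])
--             i += 1
--
--     return ''.join(result)
-- ===== SOURCE B (Python) =====
-- def fix_game_macro(text):
--     """Replace \\game{arg1}{arg2} with arg1_{arg2}.
--
--     One stack pass precomputes the matching-brace index of every unescaped
--     brace, so the rewrite pass never rescans for a matching brace."""
--     n = len(text)
--     match = {}
--     stack = []
--     for i in range(n):
--         if i > 0 and text[i - 1] == '\\':
--             continue
--         c = text[i]
--         if c == '{':
--             stack.append(i)
--         elif c == '}':
--             if stack:
--                 match[stack.pop()] = i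
--     out = []
--     i = 0
--     while i < n:
--         if text[i:i + 6] == '\\game{' and (i + 5) in match:
--             e1 = match[i + 5]
--             if e1 + 1 < n and text[e1 + 1] == '{' and (e1 + 1) in match:
--                 e2 = match[e1 + 1]
--                 out.append(text[i + 6:e1] + '_{' + text[e1 + 2:e2] + '}')
--                 i = e2 + 1
--                 continue
--         out.append(text[i])
--         i += 1
--     return ''.join(out)
-- ===== Notes on version B (the rewrite author's own statement) =====
-- stated objective: alternative
-- what changed: A rescans forward from every candidate macro occurrence to locate its matching braces; B precomputes the matching-brace index of every unescaped brace in one global stack pass over the text and the rewrite loop then finds each match by a dictionary lookup instead of a scan.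
import Mathlib
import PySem

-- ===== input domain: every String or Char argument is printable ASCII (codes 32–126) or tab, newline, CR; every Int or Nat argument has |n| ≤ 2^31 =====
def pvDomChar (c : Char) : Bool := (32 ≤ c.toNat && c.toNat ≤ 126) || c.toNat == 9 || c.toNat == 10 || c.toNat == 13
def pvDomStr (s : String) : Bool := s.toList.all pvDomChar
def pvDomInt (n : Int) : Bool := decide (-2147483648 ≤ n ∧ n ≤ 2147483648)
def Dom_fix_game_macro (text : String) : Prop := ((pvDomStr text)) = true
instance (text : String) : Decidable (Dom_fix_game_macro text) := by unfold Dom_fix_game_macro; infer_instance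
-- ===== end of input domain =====

-- B replaces A's per-occurrence forward rescan for each matching brace by one global stack
-- pass that precomputes every unescaped brace's match; the rewrite loop then looks matches
-- up in that dict instead of scanning.
-- All loops are ported with a fuel argument that only makes the recursion total; each
-- entry point passes enough fuel for its loop to finish exactly as the Python does.

-- ===== PORT A =====
-- while loop of find_matching_brace: state (i, count); returns the final (i, count).
-- s.getD (i-1) ' ' is exact for Python's s[i-1]: it is only consulted when 1 ≤ i < len(s).
def pvFmbGo (s : List Char) (count : Int) (i : Nat) : Nat → Nat × Int
  | 0 => (i, count)
  | fuel + 1 =>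
    if i < s.length ∧ 0 < count then
      let cnt : Int :=
        if s.getD i ' ' = '{' ∧ (i = 0 ∨ s.getD (i - 1) ' ' ≠ '\\') then count + 1
        else if s.getD i ' ' = '}' ∧ (i = 0 ∨ s.getD (i - 1) ' ' ≠ '\\') then count - 1
        else count
      pvFmbGo s cnt (i + 1) fuel
    else (i, count)

-- the loop advances i by 1 per step and stops once i ≥ len(s): fuel = len(s) suffices
def pvFindMatchingBrace (s : List Char) (start : Nat) : Int :=
  let r := pvFmbGo s 1 (start + 1) s.length
  if r.2 = 0 then (r.1 : Int) - 1 else -1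

-- main while loop of fix_game_macro; acc is Python's `result` (a list of strings).
-- Python slices text[a:b] here always have 0 ≤ a ≤ b ≤ len(text): exact as drop/take;
-- end1/end2 are ≥ 0 whenever ≠ -1 (pvMatch_some below), so .toNat is exact where it is used.
-- i strictly increases each iteration (end2 ≥ i+7 by pvMatch_some), so fuel = len(text)+1 suffices.
def pvAGo (s : List Char) (i : Nat) (acc : List (List Char)) : Nat → List (List Char)
  | 0 => acc
  | fuel + 1 =>
    if i < s.length then
      if (s.drop i).take 6 = ['\\', 'g', 'a', 'm', 'e', '{'] then
        let start1 := i + 5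
        let end1 := pvFindMatchingBrace s start1
        if end1 = -1 then pvAGo s (i + 1) (acc ++ [[s.getD i ' ']]) fuel
        else
          let e1 := end1.toNat
          let arg1 := (s.drop (start1 + 1)).take (e1 - (start1 + 1))
          if e1 + 1 < s.length ∧ s.getD (e1 + 1) ' ' = '{' then
            let start2 := e1 + 1
            let end2 := pvFindMatchingBrace s start2
            if end2 = -1 then pvAGo s (i + 1) (acc ++ [[s.getD i ' ']]) fuel
            else
              let e2 := end2.toNat
              let arg2 := (s.drop (start2 + 1)).take (e2 - (start2 + 1))
              pvAGo s (e2 + 1) (acc ++ [arg1 ++ ['_', '{'] ++ arg2 ++ ['}']]) fuel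
          else pvAGo s (i + 1) (acc ++ [[s.getD i ' ']]) fuel
      else pvAGo s (i + 1) (acc ++ [[s.getD i ' ']]) fuel
    else acc

def fix_game_macro (text : String) : String :=
  String.ofList (pvAGo text.toList 0 [] (text.toList.length + 1)).flatten

-- ===== PORT B =====
-- the `for i in range(n)` stack pass building the match dict (fuel = n, one unit per index)
def pvBuildGo (s : List Char) (i : Nat) (stack : List Nat) (m : PySem.Dict Nat Nat) :
    Nat → PySem.Dict Nat Nat
  | 0 => m
  | fuel + 1 =>
    if i < s.length then
      if 0 < i ∧ s.getD (i - 1) ' ' = '\\' then pvBuildGo s (i + 1) stack m fuel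
      else
        let c := s.getD i ' '
        if c = '{' then pvBuildGo s (i + 1) (stack ++ [i]) m fuel
        else if c = '}' then
          match stack.getLast? with
          | some p => pvBuildGo s (i + 1) stack.dropLast (m.insert p i) fuel
          | none => pvBuildGo s (i + 1) stack m fuel
        else pvBuildGo s (i + 1) stack m fuel
    else m

-- the rewrite while loop; it advances i by ≥ 1 per iteration on the dict pvBuildGo
-- actually produces, so fuel = len(text)+1 suffices
def pvBGo (s : List Char) (m : PySem.Dict Nat Nat) (fuel : Nat) (i : Nat)
    (acc : List (List Char)) : List (List Char) :=
  match fuel with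
  | 0 => acc
  | fuel + 1 =>
    if i < s.length then
      if (s.drop i).take 6 = ['\\', 'g', 'a', 'm', 'e', '{'] then
        match m.get? (i + 5) with
        | some e1 =>
          if e1 + 1 < s.length ∧ s.getD (e1 + 1) ' ' = '{' then
            match m.get? (e1 + 1) with
            | some e2 =>
              pvBGo s m fuel (e2 + 1)
                (acc ++ [(s.drop (i + 6)).take (e1 - (i + 6)) ++ ['_', '{'] ++
                         (s.drop (e1 + 2)).take (e2 - (e1 + 2)) ++ ['}']])
            | none => pvBGo s m fuel (i + 1) (acc ++ [[s.getD i ' ']])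
          else pvBGo s m fuel (i + 1) (acc ++ [[s.getD i ' ']])
        | none => pvBGo s m fuel (i + 1) (acc ++ [[s.getD i ' ']])
      else pvBGo s m fuel (i + 1) (acc ++ [[s.getD i ' ']])
    else acc

def fix_game_macro_alt (text : String) : String :=
  String.ofList
    (pvBGo text.toList (pvBuildGo text.toList 0 [] PySem.Dict.empty text.toList.length)
      (text.toList.length + 1) 0 []).flatten

-- ===== PRECONDITION & SPEC =====
def Spec_fix_game_macro (text : String) (out : String) : Prop := out = fix_game_macro_alt text
instance (text : String) (out : String) : Decidable (Spec_fix_game_macro text out) := by unfold Spec_fix_game_macro; infer_instance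

-- ===== CLAIM (what is proved, stated in full; the proofs are below) =====
def Claim_equal_fix_game_macro : Prop := ∀ (text : String), Dom_fix_game_macro text → Spec_fix_game_macro text (fix_game_macro text)

-- ===== LEMMAS AND PROOFS =====

-- fuel irrelevance for the counter loop: any fuel ≥ len(s) - i computes the same pair
theorem pvFmb_fuel (s : List Char) :
    ∀ (fuel fuel' i : Nat) (c : Int), s.length - i ≤ fuel → s.length - i ≤ fuel' →
      pvFmbGo s c i fuel = pvFmbGo s c i fuel' := by
  intro fuel
  induction fuel with
  | zero =>
    intro fuel' i c h h'
    have hi : ¬ i < s.length := by omega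
    cases fuel' with
    | zero => rfl
    | succ f' =>
      show pvFmbGo s c i 0 = pvFmbGo s c i (f' + 1)
      rw [pvFmbGo, pvFmbGo, if_neg (fun hh => hi hh.1)]
  | succ fuel ih =>
    intro fuel' i c h h'
    by_cases hc : i < s.length ∧ 0 < c
    · cases fuel' with
      | zero => omega
      | succ f' =>
        rw [pvFmbGo, pvFmbGo, if_pos hc, if_pos hc]
        exact ih f' (i + 1) _ (by omega) (by omega)
    · cases fuel' with
      | zero => rw [pvFmbGo, pvFmbGo, if_neg hc]
      | succ f' => rw [pvFmbGo, pvFmbGo, if_neg hc, if_neg hc]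

theorem pvFmb_step (s : List Char) (c : Int) (j fuel : Nat) (h : j < s.length) (hc : 0 < c) :
    pvFmbGo s c j (fuel + 1) = pvFmbGo s
      (if s.getD j ' ' = '{' ∧ (j = 0 ∨ s.getD (j - 1) ' ' ≠ '\\') then c + 1
       else if s.getD j ' ' = '}' ∧ (j = 0 ∨ s.getD (j - 1) ' ' ≠ '\\') then c - 1 else c)
      (j + 1) fuel := by
  conv_lhs => rw [pvFmbGo]
  rw [if_pos ⟨h, hc⟩]

theorem pvFmb_stop (s : List Char) (c : Int) (j fuel : Nat) (h : ¬(j < s.length ∧ 0 < c)) :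
    pvFmbGo s c j fuel = (j, c) := by
  cases fuel with
  | zero => rfl
  | succ f => rw [pvFmbGo, if_neg h]

-- where the counter returns 0, the scan stopped just past an unescaped '}'
theorem pvFmbGo_close (s : List Char) :
    ∀ (fuel i : Nat) (count : Int), 0 < count → (pvFmbGo s count i fuel).2 = 0 →
      i + 1 ≤ (pvFmbGo s count i fuel).1 ∧ (pvFmbGo s count i fuel).1 ≤ s.length ∧
      s.getD ((pvFmbGo s count i fuel).1 - 1) ' ' = '}' := by
  intro fuel
  induction fuel with
  | zero =>
    intro i count h0 hz
    rw [pvFmbGo] at hz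
    exact absurd hz (by simp; omega)
  | succ fuel ih =>
    intro i count h0 hz
    rw [pvFmbGo] at hz ⊢
    by_cases hc : i < s.length ∧ 0 < count
    · rw [if_pos hc] at hz ⊢
      set cnt : Int :=
        if s.getD i ' ' = '{' ∧ (i = 0 ∨ s.getD (i - 1) ' ' ≠ '\\') then count + 1
        else if s.getD i ' ' = '}' ∧ (i = 0 ∨ s.getD (i - 1) ' ' ≠ '\\') then count - 1
        else count with hcnt
      by_cases hpos : 0 < cnt
      · have := ih (i + 1) cnt hpos hz
        show i + 1 ≤ (pvFmbGo s cnt (i + 1) fuel).1 ∧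
          (pvFmbGo s cnt (i + 1) fuel).1 ≤ s.length ∧
          s.getD ((pvFmbGo s cnt (i + 1) fuel).1 - 1) ' ' = '}'
        exact ⟨by omega, this.2⟩
      · show i + 1 ≤ (pvFmbGo s cnt (i + 1) fuel).1 ∧
          (pvFmbGo s cnt (i + 1) fuel).1 ≤ s.length ∧
          s.getD ((pvFmbGo s cnt (i + 1) fuel).1 - 1) ' ' = '}'
        rw [pvFmb_stop s cnt (i + 1) fuel (fun hh => hpos hh.2)] at hz ⊢
        refine ⟨le_refl _, by simpa using hc.1, ?_⟩
        simp only [Nat.add_sub_cancel]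
        have hz' : cnt = 0 := hz
        rw [hcnt] at hz'
        split_ifs at hz' with a b
        · omega
        · exact b.1
        · omega
    · rw [if_neg hc] at hz ⊢
      simp at hz
      omega

-- single steps of the two loops, with the branch condition made explicit
theorem pvBuild_skip (s : List Char) (j fuel : Nat) (st : List Nat) (m : PySem.Dict Nat Nat)
    (h : j < s.length) (hs : 0 < j ∧ s.getD (j - 1) ' ' = '\\') :
    pvBuildGo s j st m (fuel + 1) = pvBuildGo s (j + 1) st m fuel := by
  conv_lhs => rw [pvBuildGo]
  rw [if_pos h, if_pos hs]

theorem pvBuild_open (s : List Char) (j fuel : Nat) (st : List Nat) (m : PySem.Dict Nat Nat)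
    (h : j < s.length) (hns : ¬(0 < j ∧ s.getD (j - 1) ' ' = '\\')) (hc : s.getD j ' ' = '{') :
    pvBuildGo s j st m (fuel + 1) = pvBuildGo s (j + 1) (st ++ [j]) m fuel := by
  conv_lhs => rw [pvBuildGo]
  rw [if_pos h, if_neg hns]
  simp only [hc, if_true]

theorem pvBuild_close (s : List Char) (j fuel : Nat) (st : List Nat) (m : PySem.Dict Nat Nat)
    (h : j < s.length) (hns : ¬(0 < j ∧ s.getD (j - 1) ' ' = '\\')) (hc : s.getD j ' ' = '}') :
    pvBuildGo s j st m (fuel + 1) =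
      (match st.getLast? with
       | some q => pvBuildGo s (j + 1) st.dropLast (m.insert q j) fuel
       | none => pvBuildGo s (j + 1) st m fuel) := by
  conv_lhs => rw [pvBuildGo]
  rw [if_pos h, if_neg hns]
  simp only [hc]
  rw [if_neg (by decide)]
  exact if_pos trivial

theorem pvBuild_other (s : List Char) (j fuel : Nat) (st : List Nat) (m : PySem.Dict Nat Nat)
    (h : j < s.length) (hns : ¬(0 < j ∧ s.getD (j - 1) ' ' = '\\'))
    (h1 : s.getD j ' ' ≠ '{') (h2 : s.getD j ' ' ≠ '}') :
    pvBuildGo s j st m (fuel + 1) = pvBuildGo s (j + 1) st m fuel := by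
  conv_lhs => rw [pvBuildGo]
  rw [if_pos h, if_neg hns]
  simp only [h1, h2, if_false]

theorem pvBuild_stop (s : List Char) (j fuel : Nat) (st : List Nat) (m : PySem.Dict Nat Nat)
    (h : ¬ j < s.length) : pvBuildGo s j st m fuel = m := by
  cases fuel with
  | zero => rfl
  | succ f => rw [pvBuildGo, if_neg h]

-- frame: positions already passed and not on the stack are never (re)assigned
theorem pvBuild_frame (s : List Char) (p : Nat) :
    ∀ (fuel j : Nat) (stack : List Nat) (m : PySem.Dict Nat Nat), p < j → p ∉ stack →
      (pvBuildGo s j stack m fuel).get? p = m.get? p := by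
  intro fuel
  induction fuel with
  | zero => intro j stack m _ _; rfl
  | succ fuel ih =>
    intro j stack m hj hs
    by_cases hlen : j < s.length
    · by_cases hskip : 0 < j ∧ s.getD (j - 1) ' ' = '\\'
      · rw [pvBuild_skip s j fuel stack m hlen hskip]
        exact ih (j + 1) stack m (by omega) hs
      · by_cases hob : s.getD j ' ' = '{'
        · rw [pvBuild_open s j fuel stack m hlen hskip hob]
          refine ih (j + 1) _ m (by omega) ?_
          simp only [List.mem_append, List.mem_singleton]
          rintro (h | h)
          · exact hs h
          · omega
        · by_cases hcb : s.getD j ' ' = '}'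
          · rw [pvBuild_close s j fuel stack m hlen hskip hcb]
            cases hq : stack.getLast? with
            | none =>
              show (pvBuildGo s (j + 1) stack m fuel).get? p = m.get? p
              exact ih (j + 1) stack m (by omega) hs
            | some q =>
              show (pvBuildGo s (j + 1) stack.dropLast (m.insert q j) fuel).get? p = m.get? p
              rw [ih (j + 1) _ _ (by omega) (fun h => hs (List.dropLast_subset _ h))]
              have hne : p ≠ q := fun h => hs (h ▸ List.mem_of_getLast? hq)
              simp [PySem.Dict.get?_insert, hne]
          · rw [pvBuild_other s j fuel stack m hlen hskip hob hcb]
            exact ih (j + 1) stack m (by omega) hs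
    · rw [pvBuild_stop s j (fuel + 1) stack m hlen]

-- core simulation: while p sits on the stack, the pass assigns p exactly the index
-- at which A's counter (count = 1 + #entries pushed above p) returns to 0
theorem pvBuild_sim (s : List Char) (p : Nat) :
    ∀ (fuel j : Nat) (st0 extra : List Nat) (m : PySem.Dict Nat Nat),
      p < j → p ∉ st0 → p ∉ extra →
      (pvBuildGo s j (st0 ++ p :: extra) m fuel).get? p =
        (if (pvFmbGo s (1 + extra.length) j fuel).2 = 0
         then some ((pvFmbGo s (1 + extra.length) j fuel).1 - 1) else m.get? p) := by
  intro fuel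
  induction fuel with
  | zero =>
    intro j st0 extra m hj h0 he
    rw [pvFmbGo, if_neg (by simp; omega)]
    rfl
  | succ fuel ih =>
    intro j st0 extra m hj h0 he
    by_cases hlen : j < s.length
    · rw [pvFmb_step s _ j fuel hlen (by positivity)]
      by_cases hskip : 0 < j ∧ s.getD (j - 1) ' ' = '\\'
      · have hflat : ∀ c : Int,
            (if s.getD j ' ' = '{' ∧ (j = 0 ∨ s.getD (j - 1) ' ' ≠ '\\') then c + 1
             else if s.getD j ' ' = '}' ∧ (j = 0 ∨ s.getD (j - 1) ' ' ≠ '\\') then c - 1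
             else c) = c := by
          intro c
          rw [if_neg (fun hh => hh.2.elim (fun h0' => by omega) (fun hne => hne hskip.2)),
            if_neg (fun hh => hh.2.elim (fun h0' => by omega) (fun hne => hne hskip.2))]
        rw [pvBuild_skip s j fuel _ m hlen hskip, hflat]
        exact ih (j + 1) st0 extra m (by omega) h0 he
      · have hun : j = 0 ∨ s.getD (j - 1) ' ' ≠ '\\' := by
          by_cases hj0 : j = 0
          · exact Or.inl hj0
          · exact Or.inr (fun hh => hskip ⟨by omega, hh⟩)
        by_cases hob : s.getD j ' ' = '{'
        · rw [pvBuild_open s j fuel _ m hlen hskip hob,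
            if_pos (show s.getD j ' ' = '{' ∧ (j = 0 ∨ s.getD (j - 1) ' ' ≠ '\\') from ⟨hob, hun⟩)]
          have hsh : (st0 ++ p :: extra) ++ [j] = st0 ++ p :: (extra ++ [j]) := by simp
          rw [hsh, ih (j + 1) st0 (extra ++ [j]) m (by omega) h0
            (by simp; exact ⟨he, by omega⟩)]
          have hcc : (1 : Int) + ↑(extra ++ [j]).length = 1 + ↑extra.length + 1 := by
            simp; ring
          rw [hcc]
        · by_cases hcb : s.getD j ' ' = '}'
          · rw [pvBuild_close s j fuel _ m hlen hskip hcb,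
              if_neg (show ¬(s.getD j ' ' = '{' ∧ (j = 0 ∨ s.getD (j - 1) ' ' ≠ '\\'))
                from fun hh => hob hh.1),
              if_pos (show s.getD j ' ' = '}' ∧ (j = 0 ∨ s.getD (j - 1) ' ' ≠ '\\') from ⟨hcb, hun⟩)]
            rcases List.eq_nil_or_concat extra with rfl | ⟨e', q, rfl⟩
            · rw [List.getLast?_concat]
              simp only [List.dropLast_concat]
              rw [pvBuild_frame s p fuel (j + 1) st0 (m.insert p j) (by omega) h0]
              rw [PySem.Dict.get?_insert_self]
              have hcc : (1 : Int) + ↑(List.length ([] : List Nat)) - 1 = 0 := by simp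
              rw [hcc, pvFmb_stop s 0 (j + 1) fuel (by rintro ⟨h1x, h2x⟩; omega)]
              simp
            · simp only [List.concat_eq_append] at he ⊢
              have hsh : st0 ++ p :: (e' ++ [q]) = (st0 ++ p :: e') ++ [q] := by simp
              rw [hsh, List.getLast?_concat]
              simp only [List.dropLast_concat]
              simp only [List.mem_append, List.mem_singleton, not_or] at he
              rw [ih (j + 1) st0 e' (m.insert q j) (by omega) h0 he.1]
              rw [PySem.Dict.get?_insert, if_neg he.2]
              have hcc : (1 : Int) + ↑(e' ++ [q]).length - 1 = 1 + ↑e'.length := by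
                simp; omega
              rw [hcc]
          · rw [pvBuild_other s j fuel _ m hlen hskip hob hcb,
              if_neg (show ¬(s.getD j ' ' = '{' ∧ (j = 0 ∨ s.getD (j - 1) ' ' ≠ '\\'))
                from fun hh => hob hh.1),
              if_neg (show ¬(s.getD j ' ' = '}' ∧ (j = 0 ∨ s.getD (j - 1) ' ' ≠ '\\'))
                from fun hh => hcb hh.1)]
            exact ih (j + 1) st0 extra m (by omega) h0 he
    · rw [pvBuild_stop s j (fuel + 1) _ m hlen, pvFmb_stop s _ j (fuel + 1)
        (by rintro ⟨h1x, h2x⟩; omega)]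
      rw [if_neg (by simp; omega)]

-- the value B's dict holds for an unescaped '{' at p, expressed by A's counter loop
def pvMatchOf (s : List Char) (p : Nat) : Option Nat :=
  if (pvFmbGo s 1 (p + 1) s.length).2 = 0 then some ((pvFmbGo s 1 (p + 1) s.length).1 - 1)
  else none

theorem pvBuild_get_at (s : List Char) (p fuel : Nat) (hp : p < s.length)
    (hfu : s.length - p ≤ fuel + 1)
    (hob : s.getD p ' ' = '{') (hun : p = 0 ∨ s.getD (p - 1) ' ' ≠ '\\')
    (stack : List Nat) (m : PySem.Dict Nat Nat)
    (hst : ∀ q ∈ stack, q < p) (hm : m.get? p = none) :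
    (pvBuildGo s p stack m (fuel + 1)).get? p = pvMatchOf s p := by
  have hskip : ¬(0 < p ∧ s.getD (p - 1) ' ' = '\\') := by
    rcases hun with h | h
    · omega
    · exact fun hh => h hh.2
  rw [pvBuild_open s p fuel stack m hp hskip hob]
  have hsh : stack ++ [p] = stack ++ p :: [] := rfl
  rw [hsh, pvBuild_sim s p fuel (p + 1) stack [] m (by omega)
    (fun hh => by have := hst p hh; omega) (List.not_mem_nil)]
  rw [pvFmb_fuel s fuel s.length (p + 1) _ (by omega) (by omega)]
  unfold pvMatchOf
  simp only [List.length_nil, Nat.cast_zero, add_zero, hm]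

theorem pvBuild_get (s : List Char) (p : Nat) (hp : p < s.length)
    (hob : s.getD p ' ' = '{') (hun : p = 0 ∨ s.getD (p - 1) ' ' ≠ '\\') :
    ∀ (fuel j : Nat) (stack : List Nat) (m : PySem.Dict Nat Nat),
      s.length - j ≤ fuel → j ≤ p → (∀ q ∈ stack, q < j) → m.get? p = none →
      (pvBuildGo s j stack m fuel).get? p = pvMatchOf s p := by
  intro fuel
  induction fuel with
  | zero => intro j stack m hfu hj hst hm; omega
  | succ fuel ih =>
    intro j stack m hfu hj hst hm
    by_cases hjp : j = p
    · subst hjp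
      exact pvBuild_get_at s j fuel hp (by omega) hob hun stack m hst hm
    · have hjlt : j < p := by omega
      have hjlen : j < s.length := by omega
      by_cases hskip : 0 < j ∧ s.getD (j - 1) ' ' = '\\'
      · rw [pvBuild_skip s j fuel stack m hjlen hskip]
        exact ih (j + 1) stack m (by omega) (by omega)
          (fun q hq => by have := hst q hq; omega) hm
      · by_cases hob' : s.getD j ' ' = '{'
        · rw [pvBuild_open s j fuel stack m hjlen hskip hob']
          refine ih (j + 1) (stack ++ [j]) m (by omega) (by omega) ?_ hm
          intro q hq
          rcases List.mem_append.mp hq with h | h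
          · have := hst q h; omega
          · simp at h; omega
        · by_cases hcb : s.getD j ' ' = '}'
          · rw [pvBuild_close s j fuel stack m hjlen hskip hcb]
            cases hq : stack.getLast? with
            | none =>
              show (pvBuildGo s (j + 1) stack m fuel).get? p = pvMatchOf s p
              exact ih (j + 1) stack m (by omega) (by omega)
                (fun q hq => by have := hst q hq; omega) hm
            | some q =>
              show (pvBuildGo s (j + 1) stack.dropLast (m.insert q j) fuel).get? p
                = pvMatchOf s p
              refine ih (j + 1) stack.dropLast (m.insert q j) (by omega) (by omega)
                (fun r hr => by have := hst r (List.dropLast_subset _ hr); omega) ?_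
              have hqp : p ≠ q := by
                have := hst q (List.mem_of_getLast? hq); omega
              rw [PySem.Dict.get?_insert, if_neg hqp, hm]
          · rw [pvBuild_other s j fuel stack m hjlen hskip hob' hcb]
            exact ih (j + 1) stack m (by omega) (by omega)
              (fun q hq => by have := hst q hq; omega) hm

theorem pvBuild_main (s : List Char) (p : Nat) (hp : p < s.length)
    (hob : s.getD p ' ' = '{') (hun : p = 0 ∨ s.getD (p - 1) ' ' ≠ '\\') :
    (pvBuildGo s 0 [] PySem.Dict.empty s.length).get? p = pvMatchOf s p :=
  pvBuild_get s p hp hob hun s.length 0 [] PySem.Dict.empty (by omega) (by omega)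
    (by simp) (PySem.Dict.get?_empty p)

-- translate pvMatchOf back to pvFindMatchingBrace's -1 / index convention
theorem pvMatch_none (s : List Char) (p : Nat) (h : pvMatchOf s p = none) :
    pvFindMatchingBrace s p = -1 := by
  unfold pvMatchOf at h
  unfold pvFindMatchingBrace
  by_cases hz : (pvFmbGo s 1 (p + 1) s.length).2 = 0
  · simp [hz] at h
  · simp [hz]

theorem pvMatch_some (s : List Char) (p e : Nat) (h : pvMatchOf s p = some e) :
    pvFindMatchingBrace s p = (e : Int) ∧ p + 1 ≤ e ∧ e + 1 ≤ s.length ∧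
      s.getD e ' ' = '}' := by
  unfold pvMatchOf at h
  unfold pvFindMatchingBrace
  by_cases hz : (pvFmbGo s 1 (p + 1) s.length).2 = 0
  · have hc := pvFmbGo_close s s.length (p + 1) 1 one_pos hz
    simp only [hz, if_pos] at h ⊢
    have he : e = (pvFmbGo s 1 (p + 1) s.length).1 - 1 := (Option.some_inj.mp h).symm
    subst he
    refine ⟨by omega, by omega, by omega, hc.2.2⟩
  · simp [hz] at h

-- facts extracted from text[i:i+6] == '\game{'
theorem pvSlice_facts (s : List Char) (i : Nat)
    (h : (s.drop i).take 6 = ['\\', 'g', 'a', 'm', 'e', '{']) :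
    i + 6 ≤ s.length ∧ s.getD (i + 4) ' ' = 'e' ∧ s.getD (i + 5) ' ' = '{' := by
  have hlen := congrArg List.length h
  simp [List.length_take, List.length_drop] at hlen
  have hlen' : i + 6 ≤ s.length := by omega
  have h4 := congrArg (fun l => l[4]?) h
  have h5 := congrArg (fun l => l[5]?) h
  simp only [List.getElem?_take_of_lt (by omega : (4:Nat) < 6),
    List.getElem?_take_of_lt (by omega : (5:Nat) < 6), List.getElem?_drop] at h4 h5
  simp at h4 h5
  exact ⟨hlen', by simp [List.getD_eq_getElem?_getD, h4], by simp [List.getD_eq_getElem?_getD, h5]⟩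

-- the two rewrite loops agree step by step (with the same fuel on both sides)
theorem pvGo_agree (s : List Char) :
    ∀ (fuel i : Nat) (acc : List (List Char)),
      pvBGo s (pvBuildGo s 0 [] PySem.Dict.empty s.length) fuel i acc = pvAGo s i acc fuel := by
  intro fuel
  induction fuel with
  | zero => intro i acc; rfl
  | succ fuel ih =>
    intro i acc
    rw [pvBGo, pvAGo]
    by_cases hi : i < s.length
    · rw [if_pos hi, if_pos hi]
      by_cases hsl : (s.drop i).take 6 = ['\\', 'g', 'a', 'm', 'e', '{']
      · rw [if_pos hsl]
        simp only [if_pos hsl]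
        obtain ⟨hl6, he4, hb5⟩ := pvSlice_facts s i hsl
        have hm1 : (pvBuildGo s 0 [] PySem.Dict.empty s.length).get? (i + 5) = pvMatchOf s (i + 5) :=
          pvBuild_main s (i + 5) (by omega) hb5
            (Or.inr (by rw [show i + 5 - 1 = i + 4 from rfl, he4]; decide))
        rw [hm1]
        cases hmo : pvMatchOf s (i + 5) with
        | none =>
          have hf := pvMatch_none s (i + 5) hmo
          simp only [hf, reduceIte]
          exact ih (i + 1) _
        | some e1 =>
          obtain ⟨hf, he1g, he1l, hclose⟩ := pvMatch_some s (i + 5) e1 hmo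
          simp only [hf]
          rw [if_neg (show ¬((e1 : Int) = -1) by omega)]
          simp only [Int.toNat_natCast]
          by_cases hc2 : e1 + 1 < s.length ∧ s.getD (e1 + 1) ' ' = '{'
          · rw [if_pos hc2, if_pos hc2]
            have hm2 : (pvBuildGo s 0 [] PySem.Dict.empty s.length).get? (e1 + 1)
                = pvMatchOf s (e1 + 1) :=
              pvBuild_main s (e1 + 1) hc2.1 hc2.2
                (Or.inr (by rw [show e1 + 1 - 1 = e1 from rfl, hclose]; decide))
            rw [hm2]
            cases hmo2 : pvMatchOf s (e1 + 1) with
            | none =>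
              have hf2 := pvMatch_none s (e1 + 1) hmo2
              simp only [hf2, reduceIte]
              exact ih (i + 1) _
            | some e2 =>
              obtain ⟨hf2, he2g, he2l, hclose2⟩ := pvMatch_some s (e1 + 1) e2 hmo2
              simp only [hf2]
              rw [if_neg (show ¬((e2 : Int) = -1) by omega)]
              simp only [Int.toNat_natCast]
              rw [show i + 5 + 1 = i + 6 from rfl, show e1 + 1 + 1 = e1 + 2 from rfl]
              exact ih (e2 + 1) _
          · rw [if_neg hc2, if_neg hc2]
            exact ih (i + 1) _
      · rw [if_neg hsl, if_neg hsl]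
        exact ih (i + 1) _
    · rw [if_neg hi, if_neg hi]

-- ===== VERDICT (by name: the statement is the Claim_ definition above) =====
theorem fix_game_macro_spec : Claim_equal_fix_game_macro := by
  intro text _
  unfold Spec_fix_game_macro fix_game_macro fix_game_macro_alt
  rw [pvGo_agree text.toList (text.toList.length + 1) 0 []]
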